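-- pv_equiv track=rewrite | github.com/tspeke/tspeke.github.io | practice-pages/python/smallest-char-gap.py | smallest_gap
-- ===== SOURCE A (Python) =====
-- def smallest_gap(s):
--     L_letters = unique_characters(s)
--
--     # For each unique character now find the length of each gap between same character (if any)
--     smallest_gap = len(s)
--     smallest_gap_str = None
--     smallest_gap_pos = len(s)
--
--     for letter in L_letters:
--
--         L_letter_pos = []
--
--         for i, char in enumerate(s):
--
--             if char == letter:
--                 L_letter_pos.append(i)
--
--         if len(L_letter_pos) >= 2: # Otherwise no gap => not interested
--
--             prev_letter_pos = None
--             for letter_pos in L_letter_pos: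
--                 if prev_letter_pos != None:
--                     gap_size = letter_pos - prev_letter_pos - 1
--                     if gap_size < smallest_gap or (gap_size == smallest_gap and prev_letter_pos < smallest_gap_pos): # Choosing the gap that comes first when have gaps of equal size
--                         smallest_gap = gap_size
--                         smallest_gap_pos = prev_letter_pos
--                         smallest_gap_str = s[prev_letter_pos+1:letter_pos]
--
--                 prev_letter_pos = letter_pos
--
--     return smallest_gap_str
--
-- def unique_characters(s):
--     L_letters = []
--
--     L_letters.append(s[0]) # Just so that list is no longer empty
--
--     for char in s:
--
--         is_new_char = True
--         for letter in L_letters: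
--             if char == letter:
--                 is_new_char = False
--
--         if is_new_char:
--             L_letters.append(char)
--
--     return L_letters
-- ===== SOURCE B (Python) =====
-- def smallest_gap(s):
--     last = {}
--     best = None  # (gap, prev_pos, end_pos), minimized lexicographically on (gap, prev_pos)
--     for i, c in enumerate(s):
--         j = last.get(c)
--         if j is not None:
--             gap = i - j - 1
--             if best is None or gap < best[0] or (gap == best[0] and j < best[1]):
--                 best = (gap, j, i)
--         last[c] = i
--     if best is None:
--         return None
--     return s[best[1] + 1:best[2]]
-- ===== Notes on version B (the rewrite author's own statement) =====
-- stated objective: faster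
-- what changed: Replaced the per-unique-character rescans of the whole string (and the quadratic hand-rolled unique_characters helper) by a single left-to-right pass that keeps a dict of each character's last-seen index and the lexicographic minimum of (gap, start) on the fly.
import Mathlib
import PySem

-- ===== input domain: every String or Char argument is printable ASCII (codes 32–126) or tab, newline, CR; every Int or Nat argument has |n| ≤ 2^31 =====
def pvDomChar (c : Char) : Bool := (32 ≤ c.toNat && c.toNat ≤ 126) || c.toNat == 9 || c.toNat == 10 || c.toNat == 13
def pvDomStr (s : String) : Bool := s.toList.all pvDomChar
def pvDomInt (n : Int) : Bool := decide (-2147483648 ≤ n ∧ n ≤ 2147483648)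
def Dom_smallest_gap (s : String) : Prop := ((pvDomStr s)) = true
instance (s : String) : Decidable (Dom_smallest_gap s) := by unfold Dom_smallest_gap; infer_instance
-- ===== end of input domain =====

-- B replaces A's per-unique-character rescans of the string by one left-to-right pass
-- with a dict of last-seen indices (objective: faster, O(n) instead of O(n·U)).

-- ===== PORT A =====
def smallest_gap (s : String) : Option String :=
  let cs := s.toList
  -- unique_characters: start from [s[0]], append each char not yet present
  let letters := cs.foldl (fun L c =>
      if (L.foldl (fun b l => if c = l then false else b) true) then L ++ [c] else L)
    [PySem.List.pyGetD cs 0 ' ']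
  let n : Int := PySem.Str.len s
  -- state: (smallest_gap, smallest_gap_str, smallest_gap_pos)
  (letters.foldl (fun (st : Int × Option String × Int) letter =>
      let pos := (PySem.List.enumerate cs 0).foldl
          (fun acc p => if p.2 = letter then acc ++ [p.1] else acc) ([] : List Int)
      if 2 ≤ pos.length then
        (pos.foldl (fun (q : Option Int × Int × Option String × Int) lp =>
            match q.1 with
            | none => (some lp, q.2)
            | some prev =>
              let g := lp - prev - 1
              if g < q.2.1 ∨ (g = q.2.1 ∧ prev < q.2.2.2) then
                (some lp, (g, some (PySem.Str.slice s (some (prev + 1)) (some lp)), prev))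
              else (some lp, q.2)) (none, st)).2
      else st) (n, none, n)).2.1

-- ===== PORT B =====
def smallest_gap_alt (s : String) : Option String :=
  -- one pass: dict of last-seen index per char, best = (gap, prev_pos, end_pos)
  let fin := (PySem.List.enumerate s.toList 0).foldl
    (fun (st : PySem.Dict Char Int × Option (Int × Int × Int)) p =>
      let best := match st.1.get? p.2 with
        | none => st.2
        | some j =>
          let g := p.1 - j - 1
          match st.2 with
          | none => some (g, j, p.1)
          | some b => if g < b.1 ∨ (g = b.1 ∧ j < b.2.1) then some (g, j, p.1) else st.2
      (st.1.insert p.2 p.1, best))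
    (PySem.Dict.empty, none)
  match fin.2 with
  | none => none
  | some b => some (PySem.Str.slice s (some (b.2.1 + 1)) (some b.2.2))

-- ===== PRECONDITION & SPEC =====
-- A raises IndexError on the empty string (unique_characters reads s[0]); Pre_ excludes it.
def Pre_smallest_gap (s : String) : Prop := s ≠ ""
instance (s : String) : Decidable (Pre_smallest_gap s) := by unfold Pre_smallest_gap; infer_instance
def pvWitness_smallest_gap : String := "abcabc"

def Spec_smallest_gap (s : String) (out : Option String) : Prop := out = smallest_gap_alt s
instance (s : String) (out : Option String) : Decidable (Spec_smallest_gap s out) := by unfold Spec_smallest_gap; infer_instance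

-- ===== CLAIM (what is proved, stated in full; the proofs are below) =====
def Claim_equal_smallest_gap : Prop := ∀ (s : String), Dom_smallest_gap s → Pre_smallest_gap s → Spec_smallest_gap s (smallest_gap s)

-- ===== LEMMAS AND PROOFS =====

-- proof-only helpers: the canonical "candidate pair" picture both programs compute
-- occurrence indices of character c in cs, in order
def pvOcc (cs : List Char) (c : Char) : List Int :=
  ((PySem.List.enumerate cs 0).filter (fun p => p.2 == c)).map Prod.fst
-- consecutive pairs of a list
def pvAdj (l : List Int) : List (Int × Int) := l.zip l.tail
-- lexicographic (gap, start) minimum update, first-seen wins ties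
def pvUpd (b : Option (Int × Int)) (p : Int × Int) : Option (Int × Int) :=
  match b with
  | none => some p
  | some q => if p.2 - p.1 - 1 < q.2 - q.1 - 1 ∨ (p.2 - p.1 - 1 = q.2 - q.1 - 1 ∧ p.1 < q.1) then some p else some q
def pvBest (l : List (Int × Int)) : Option (Int × Int) := l.foldl pvUpd none
-- all consecutive same-char pairs, grouped per first-occurrence-ordered character
def pvPairs (cs : List Char) : List (Int × Int) :=
  (PySem.List.dedup cs).flatMap (fun c => pvAdj (pvOcc cs c))
-- A's loop body as a function of the candidate pair
def pvUpdA (s : String) (st : Int × Option String × Int) (p : Int × Int) : Int × Option String × Int :=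
  if p.2 - p.1 - 1 < st.1 ∨ (p.2 - p.1 - 1 = st.1 ∧ p.1 < st.2.2) then
    (p.2 - p.1 - 1, some (PySem.Str.slice s (some (p.1 + 1)) (some p.2)), p.1)
  else st
-- A's state rendered from the best pair
def pvRender (s : String) (n : Int) (b : Option (Int × Int)) : Int × Option String × Int :=
  match b with
  | none => (n, none, n)
  | some p => (p.2 - p.1 - 1, some (PySem.Str.slice s (some (p.1 + 1)) (some p.2)), p.1)
-- B's best triple from a pair
def pvTriple (p : Int × Int) : Int × Int × Int := (p.2 - p.1 - 1, p.1, p.2)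
-- the two loop bodies, named (definitionally equal to the ports' lambdas)
def pvStepA (s : String) (q : Option Int × Int × Option String × Int) (lp : Int) :
    Option Int × Int × Option String × Int :=
  match q.1 with
  | none => (some lp, q.2)
  | some prev =>
    let g := lp - prev - 1
    if g < q.2.1 ∨ (g = q.2.1 ∧ prev < q.2.2.2) then
      (some lp, (g, some (PySem.Str.slice s (some (prev + 1)) (some lp)), prev))
    else (some lp, q.2)
def pvStepB (st : PySem.Dict Char Int × Option (Int × Int × Int)) (p : Int × Char) :
    PySem.Dict Char Int × Option (Int × Int × Int) :=
  let best := match st.1.get? p.2 with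
    | none => st.2
    | some j =>
      let g := p.1 - j - 1
      match st.2 with
      | none => some (g, j, p.1)
      | some b => if g < b.1 ∨ (g = b.1 ∧ j < b.2.1) then some (g, j, p.1) else st.2
  (st.1.insert p.2 p.1, best)

lemma pv_stepA_some (s : String) (pr lp : Int) (st : Int × Option String × Int) :
    pvStepA s (some pr, st) lp = (some lp, pvUpdA s st (pr, lp)) := by
  unfold pvStepA pvUpdA
  dsimp only
  split_ifs <;> rfl

lemma pv_isnew_fold (c : Char) : ∀ (L : List Char) (b : Bool),
    L.foldl (fun b l => if c = l then false else b) b = (b && !L.contains c) := by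
  intro L
  induction L with
  | nil => intro b; simp
  | cons x L ih =>
    intro b
    rw [List.foldl_cons, ih]
    by_cases hx : c = x <;>
      simp [hx]

lemma pv_uniq_eq_dedup (c0 : Char) (t : List Char) :
    (c0 :: t).foldl (fun L c =>
      if (L.foldl (fun b l => if c = l then false else b) true) then L ++ [c] else L) [c0]
    = PySem.List.dedup (c0 :: t) := by
  have hfun : (fun (L : List Char) c =>
      if (L.foldl (fun b l => if c = l then false else b) true) then L ++ [c] else L)
      = PySem.Set.add := by
    funext L c
    rw [pv_isnew_fold]
    unfold PySem.Set.add
    simp only [PySem.Set.contains, Bool.true_and]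
    by_cases hb : c ∈ L <;> simp [List.contains_eq_mem, hb]
  rw [hfun]
  show List.foldl PySem.Set.add [c0] (c0 :: t)
      = List.foldl PySem.Set.add PySem.Set.empty (c0 :: t)
  rw [List.foldl_cons, List.foldl_cons]
  congr 1
  simp [PySem.Set.add, PySem.Set.contains, PySem.Set.empty]

lemma pv_inner_filt (cs : List Char) (letter : Char) :
    (PySem.List.enumerate cs 0).foldl
      (fun acc p => if p.2 = letter then acc ++ [p.1] else acc) ([] : List Int)
    = pvOcc cs letter := by
  suffices h : ∀ (l : List (Int × Char)) (acc : List Int),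
      l.foldl (fun acc p => if p.2 = letter then acc ++ [p.1] else acc) acc
      = acc ++ (l.filter (fun p => p.2 == letter)).map Prod.fst by
    simpa [pvOcc] using h (PySem.List.enumerate cs 0) []
  intro l
  induction l with
  | nil => intro acc; simp
  | cons x l ih =>
    intro acc
    by_cases hx : x.2 = letter <;>
      simp [hx, ih]

lemma pv_prev_thread (s : String) : ∀ (l : List Int) (pr : Int) (st : Int × Option String × Int),
    (l.foldl (pvStepA s) (some pr, st)).2 = (pvAdj (pr :: l)).foldl (pvUpdA s) st := by
  intro l
  induction l with
  | nil => intro pr st; simp [pvAdj]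
  | cons lp l ih =>
    intro pr st
    have hadj : pvAdj (pr :: lp :: l) = (pr, lp) :: pvAdj (lp :: l) := by simp [pvAdj]
    rw [hadj, List.foldl_cons, List.foldl_cons, pv_stepA_some, ih]

lemma pv_prev_thread_none (s : String) (l : List Int) (st : Int × Option String × Int) :
    (l.foldl (pvStepA s) (none, st)).2 = (pvAdj l).foldl (pvUpdA s) st := by
  cases l with
  | nil => rfl
  | cons lp l =>
    rw [List.foldl_cons]
    have h0 : pvStepA s (none, st) lp = (some lp, st) := rfl
    rw [h0, pv_prev_thread]

lemma pv_foldl_flatMap {α β σ : Type} (g : α → List β) (f : σ → β → σ) :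
    ∀ (L : List α) (init : σ),
    (L.flatMap g).foldl f init = L.foldl (fun st c => (g c).foldl f st) init := by
  intro L
  induction L with
  | nil => intro init; simp
  | cons x L ih => intro init; simp [List.flatMap_cons, List.foldl_append, ih]

lemma pv_fold_render (s : String) (n : Int) : ∀ (l : List (Int × Int)) (b : Option (Int × Int)),
    (∀ p ∈ l, 0 ≤ p.1 ∧ p.1 < p.2 ∧ p.2 < n) →
    l.foldl (pvUpdA s) (pvRender s n b) = pvRender s n (l.foldl pvUpd b) := by
  intro l
  induction l with
  | nil => intro b _; rfl
  | cons p l ih =>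
    intro b hb
    rw [List.foldl_cons, List.foldl_cons]
    have hstep : pvUpdA s (pvRender s n b) p = pvRender s n (pvUpd b p) := by
      rcases b with _ | q
      · have hbp := hb p (by simp)
        have hlt : p.2 - p.1 - 1 < n := by omega
        simp [pvUpdA, pvRender, pvUpd, hlt]
      · unfold pvUpdA pvRender pvUpd
        dsimp only
        split_ifs <;> rfl
    rw [hstep]
    exact ih (pvUpd b p) (fun x hx => hb x (by simp [hx]))

lemma pv_mem_occ (cs : List Char) (c : Char) (a : Int) :
    a ∈ pvOcc cs c ↔ ∃ (k : Nat) (h : k < cs.length), a = (k : Int) ∧ cs[k] = c := by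
  unfold pvOcc
  simp only [List.mem_map, List.mem_filter, PySem.List.mem_enumerate_iff, beq_iff_eq]
  constructor
  · rintro ⟨⟨i, ch⟩, ⟨⟨k, hk, hp⟩, hch⟩, rfl⟩
    rcases Prod.mk.injEq .. ▸ hp with ⟨h1, h2⟩
    exact ⟨k, hk, by simpa using h1, by rw [← h2]; exact hch⟩
  · rintro ⟨k, hk, rfl, hc⟩
    exact ⟨((k : Int), cs[k]), ⟨⟨k, hk, by simp⟩, hc⟩, rfl⟩

lemma pv_occ_pairwise (cs : List Char) (c : Char) : (pvOcc cs c).Pairwise (· < ·) := by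
  unfold pvOcc
  refine List.Pairwise.map Prod.fst (fun a b hab => hab) ?_
  exact List.Pairwise.filter _ (PySem.List.pairwise_lt_enumerate cs 0)

lemma pv_mem_adj : ∀ (l : List Int), l.Pairwise (· < ·) → ∀ (p : Int × Int), p ∈ pvAdj l →
    p.1 ∈ l ∧ p.2 ∈ l ∧ p.1 < p.2 := by
  intro l
  induction l with
  | nil => intro _ p hp; simp [pvAdj] at hp
  | cons a l ih =>
    intro hl p hp
    cases l with
    | nil => simp [pvAdj] at hp
    | cons b l =>
      simp only [pvAdj, List.tail_cons, List.zip_cons_cons] at hp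
      rcases List.mem_cons.mp hp with hp2 | hp2
      · subst hp2
        exact ⟨by simp, by simp, (List.pairwise_cons.mp hl).1 b (by simp)⟩
      · have h3 := ih (List.pairwise_cons.mp hl).2 p hp2
        exact ⟨by simp [h3.1], by simp [h3.2.1], h3.2.2⟩

lemma pv_occ_char_eq {cs : List Char} {c c' : Char} {a : Int}
    (h : a ∈ pvOcc cs c) (h' : a ∈ pvOcc cs c') : c = c' := by
  rcases (pv_mem_occ cs c a).mp h with ⟨k, hk, rfl, hc⟩
  rcases (pv_mem_occ cs c' _).mp h' with ⟨k', hk', hkk, hc'⟩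
  have : k = k' := by exact_mod_cast hkk
  subst this
  rw [← hc, ← hc']

lemma pv_occ_nil {cs : List Char} {c : Char} (h : c ∉ cs) : pvOcc cs c = [] := by
  rcases hne : pvOcc cs c with _ | ⟨a, l⟩
  · rfl
  · exfalso
    have : a ∈ pvOcc cs c := by rw [hne]; simp
    rcases (pv_mem_occ cs c a).mp this with ⟨k, hk, _, hc⟩
    exact h (hc ▸ List.getElem_mem hk)

lemma pv_occ_ne_nil {cs : List Char} {c : Char} (h : c ∈ cs) : pvOcc cs c ≠ [] := by
  rcases List.mem_iff_getElem.mp h with ⟨k, hk, hc⟩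
  have : (k : Int) ∈ pvOcc cs c := (pv_mem_occ cs c k).mpr ⟨k, hk, rfl, hc⟩
  exact fun hnil => by simp [hnil] at this

lemma pv_occ_append (t : List Char) (c c' : Char) :
    pvOcc (t ++ [c]) c' = pvOcc t c' ++ (if c' = c then [(t.length : Int)] else []) := by
  unfold pvOcc
  rw [PySem.List.enumerate_append, List.filter_append, List.map_append]
  congr 1
  simp only [PySem.List.enumerate, List.filter]
  by_cases hc : c' = c
  · simp [hc]
  · have hb : (c == c') = false := by simp [Ne.symm hc]
    simp [hc, hb]

lemma pv_dedup_append (t : List Char) (c : Char) :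
    PySem.List.dedup (t ++ [c])
    = if c ∈ t then PySem.List.dedup t else PySem.List.dedup t ++ [c] := by
  show PySem.Set.ofList (t ++ [c]) = _
  unfold PySem.Set.ofList
  rw [List.foldl_append]
  show PySem.Set.add (PySem.List.dedup t) c = _
  unfold PySem.Set.add
  by_cases hc : c ∈ t <;>
    simp [PySem.Set.contains, hc]

lemma pv_pairs_bounds (cs : List Char) : ∀ p ∈ pvPairs cs,
    0 ≤ p.1 ∧ p.1 < p.2 ∧ p.2 < (cs.length : Int) := by
  intro p hp
  unfold pvPairs at hp
  rcases List.mem_flatMap.mp hp with ⟨c, _, hpc⟩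
  have h3 := pv_mem_adj (pvOcc cs c) (pv_occ_pairwise cs c) p hpc
  rcases (pv_mem_occ cs c p.1).mp h3.1 with ⟨k1, hk1, he1, _⟩
  rcases (pv_mem_occ cs c p.2).mp h3.2.1 with ⟨k2, hk2, he2, _⟩
  refine ⟨?_, h3.2.2, ?_⟩ <;> omega

lemma pv_adj_concat {l : List Int} (h : l ≠ []) (m : Int) :
    pvAdj (l ++ [m]) = pvAdj l ++ [(l.getLast h, m)] := by
  induction l with
  | nil => exact absurd rfl h
  | cons a l ih =>
    cases l with
    | nil => simp [pvAdj]
    | cons b l =>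
      have hne : b :: l ≠ [] := by simp
      have h2 := ih hne
      simp only [pvAdj, List.cons_append, List.tail_cons] at h2 ⊢
      simp [List.zip_cons_cons, h2, List.getLast_cons hne]

lemma pv_upd_comm (b : Option (Int × Int)) (p q : Int × Int) (h : p.1 ≠ q.1) :
    pvUpd (pvUpd b p) q = pvUpd (pvUpd b q) p := by
  rcases p with ⟨p1, p2⟩
  rcases q with ⟨q1, q2⟩
  simp only [ne_eq] at h
  rcases b with _ | ⟨b1, b2⟩ <;>
    simp only [pvUpd] <;>
    split_ifs <;>
    (try simp) <;>
    (try split_ifs) <;>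
    first
      | rfl
      | (exfalso; omega)

lemma pv_fold_upd_insert : ∀ (Y : List (Int × Int)) (b : Option (Int × Int)) (p : Int × Int),
    (∀ y ∈ Y, y.1 ≠ p.1) →
    Y.foldl pvUpd (pvUpd b p) = pvUpd (Y.foldl pvUpd b) p := by
  intro Y
  induction Y with
  | nil => intro b p _; simp
  | cons y Y ih =>
    intro b p hY
    have h1 : y.1 ≠ p.1 := hY y (by simp)
    simp only [List.foldl_cons]
    rw [pv_upd_comm b p y (Ne.symm h1)]
    exact ih (pvUpd b y) p (fun z hz => hY z (by simp [hz]))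

lemma pv_best_middle (X Y : List (Int × Int)) (p : Int × Int) (h : ∀ y ∈ Y, y.1 ≠ p.1) :
    pvBest (X ++ p :: Y) = pvUpd (pvBest (X ++ Y)) p := by
  simp only [pvBest, List.foldl_append, List.foldl_cons]
  exact pv_fold_upd_insert Y _ p h

lemma pv_portA_eq (s : String) (h : s.toList ≠ []) :
    smallest_gap s
    = (pvBest (pvPairs s.toList)).map
        (fun p => PySem.Str.slice s (some (p.1 + 1)) (some p.2)) := by
  rcases hcs : s.toList with _ | ⟨c0, t⟩
  · exact absurd hcs h
  simp only [smallest_gap, PySem.Str.len_eq, hcs, PySem.List.pyGetD_zero_cons]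
  rw [pv_uniq_eq_dedup c0 t]
  have hbody : (fun (st : Int × Option String × Int) letter =>
      let pos := (PySem.List.enumerate (c0 :: t) 0).foldl
          (fun acc p => if p.2 = letter then acc ++ [p.1] else acc) ([] : List Int)
      if 2 ≤ pos.length then
        (pos.foldl (fun (q : Option Int × Int × Option String × Int) lp =>
            match q.1 with
            | none => (some lp, q.2)
            | some prev =>
              let g := lp - prev - 1
              if g < q.2.1 ∨ (g = q.2.1 ∧ prev < q.2.2.2) then
                (some lp, (g, some (PySem.Str.slice s (some (prev + 1)) (some lp)), prev))
              else (some lp, q.2)) (none, st)).2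
      else st)
      = fun st letter => (pvAdj (pvOcc (c0 :: t) letter)).foldl (pvUpdA s) st := by
    funext st letter
    dsimp only
    rw [pv_inner_filt]
    have hstep : (fun (q : Option Int × Int × Option String × Int) lp =>
        match q.1 with
        | none => (some lp, q.2)
        | some prev =>
          let g := lp - prev - 1
          if g < q.2.1 ∨ (g = q.2.1 ∧ prev < q.2.2.2) then
            (some lp, (g, some (PySem.Str.slice s (some (prev + 1)) (some lp)), prev))
          else (some lp, q.2)) = pvStepA s := rfl
    rw [hstep, pv_prev_thread_none]
    by_cases hl : 2 ≤ (pvOcc (c0 :: t) letter).length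
    · rw [if_pos hl]
    · rw [if_neg hl]
      rcases hocc2 : pvOcc (c0 :: t) letter with _ | ⟨a, _ | ⟨b, l3⟩⟩
    
      · rfl
      · rfl
      · rw [hocc2] at hl
        exact absurd (by simp) hl
  rw [hbody]
  rw [← pv_foldl_flatMap (fun ch => pvAdj (pvOcc (c0 :: t) ch)) (pvUpdA s)
      (PySem.List.dedup (c0 :: t))]
  have hin : ((((c0 :: t).length : Int)), (none : Option String), (((c0 :: t).length : Int)))
      = pvRender s ((c0 :: t).length : Int) none := rfl
  rw [hin,
    show List.flatMap (fun ch => pvAdj (pvOcc (c0 :: t) ch)) (PySem.List.dedup (c0 :: t))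
        = pvPairs (c0 :: t) from rfl,
    pv_fold_render s ((c0 :: t).length : Int) (pvPairs (c0 :: t)) none
      (pv_pairs_bounds (c0 :: t))]
  show (pvRender s _ (pvBest (pvPairs (c0 :: t)))).2.1 = _
  rcases hb : pvBest (pvPairs (c0 :: t)) with _ | p
  · rfl
  · rfl

lemma pv_portB_inv : ∀ (t : List Char),
    ∃ d : PySem.Dict Char Int,
      ((PySem.List.enumerate t 0).foldl pvStepB (PySem.Dict.empty, none))
      = (d, (pvBest (pvPairs t)).map pvTriple)
      ∧ ∀ c, d.get? c = (pvOcc t c).getLast? := by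
  intro t
  induction t using List.reverseRecOn with
  | nil => exact ⟨PySem.Dict.empty, rfl, fun c => rfl⟩
  | append_singleton t c ih =>
    obtain ⟨d, hfold, hget⟩ := ih
    have henum1 : PySem.List.enumerate [c] ((0 : Int) + (t.length : Int)) = [(((t.length : Int)), c)] := by
      norm_num [PySem.List.enumerate]
    rw [PySem.List.enumerate_append, List.foldl_append, hfold, henum1, List.foldl_cons,
      List.foldl_nil]
    have hg : ∀ c', c' ∈ t → c' ≠ c → pvOcc (t ++ [c]) c' = pvOcc t c' := by
      intro c' _ hne
      rw [pv_occ_append, if_neg hne, List.append_nil]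
    by_cases hc : c ∈ t
    · -- c already occurs: one new candidate pair (last occurrence of c, t.length)
      have hocc : pvOcc t c ≠ [] := pv_occ_ne_nil hc
      have hlast : (pvOcc t c).getLast? = some ((pvOcc t c).getLast hocc) :=
        List.getLast?_eq_some_getLast hocc
      set j := (pvOcc t c).getLast hocc with hj
      -- decompose the dedup list around c
      have hcd : c ∈ PySem.List.dedup t := (PySem.List.mem_dedup t c).mpr hc
      obtain ⟨u, v, huv⟩ := List.append_of_mem hcd
      have hnd := PySem.List.nodup_dedup t
      rw [huv, List.nodup_append] at hnd
      have hcu : c ∉ u := fun hmem => hnd.2.2 c hmem c (by simp) rfl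
      have hcv : c ∉ v := (List.nodup_cons.mp hnd.2.1).1
      have hflat : ∀ (w : List Char), c ∉ w → (∀ x ∈ w, x ∈ t) →
          w.flatMap (fun c' => pvAdj (pvOcc (t ++ [c]) c'))
          = w.flatMap (fun c' => pvAdj (pvOcc t c')) := by
        intro w hw hsub
        refine List.flatMap_congr (fun x hx => ?_)
        rw [hg x (hsub x hx) (fun hxc => hw (hxc ▸ hx))]
      have hsubu : ∀ x ∈ u, x ∈ t := fun x hx =>
        (PySem.List.mem_dedup t x).mp (huv ▸ (by simp [hx] : x ∈ u ++ c :: v))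
      have hsubv : ∀ x ∈ v, x ∈ t := fun x hx =>
        (PySem.List.mem_dedup t x).mp (huv ▸ (by simp [hx] : x ∈ u ++ c :: v))
      have hpairs : pvPairs (t ++ [c])
          = (u.flatMap (fun c' => pvAdj (pvOcc t c')) ++ pvAdj (pvOcc t c))
            ++ (j, (t.length : Int)) :: v.flatMap (fun c' => pvAdj (pvOcc t c')) := by
        unfold pvPairs
        rw [pv_dedup_append, if_pos hc, huv, List.flatMap_append, List.flatMap_cons]
        rw [hflat u hcu hsubu, hflat v hcv hsubv]
        rw [pv_occ_append, if_pos rfl, pv_adj_concat hocc]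
        simp [List.append_assoc]
        exact hj.symm
      have hpairs_t : pvPairs t
          = (u.flatMap (fun c' => pvAdj (pvOcc t c')) ++ pvAdj (pvOcc t c))
            ++ v.flatMap (fun c' => pvAdj (pvOcc t c')) := by
        unfold pvPairs
        rw [huv, List.flatMap_append, List.flatMap_cons]
        simp [List.append_assoc]
      have hY : ∀ y ∈ v.flatMap (fun c' => pvAdj (pvOcc t c')), y.1 ≠ j := by
        intro y hy hyj
        rcases List.mem_flatMap.mp hy with ⟨c', hc', hyc⟩
        have hmem := (pv_mem_adj (pvOcc t c') (pv_occ_pairwise t c') y hyc).1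
        have hjmem : j ∈ pvOcc t c := List.getLast_mem hocc
        exact hcv ((pv_occ_char_eq (hyj ▸ hmem) hjmem) ▸ hc')
      have hbest : pvBest (pvPairs (t ++ [c]))
          = pvUpd (pvBest (pvPairs t)) (j, (t.length : Int)) := by
        rw [hpairs, pv_best_middle _ _ _ hY, ← hpairs_t]
      refine ⟨d.insert c (t.length : Int), ?_, ?_⟩
      · unfold pvStepB
        dsimp only
        rw [hget c, hlast, hbest]
        congr 1
        rcases hb : pvBest (pvPairs t) with _ | q
        · rfl
        · unfold pvUpd pvTriple
          dsimp only [Option.map_some]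
          split_ifs <;> rfl
      · intro c'
        rw [PySem.Dict.get?_insert]
        by_cases hcc : c' = c
        · subst hcc
          rw [if_pos rfl, pv_occ_append, if_pos rfl, List.getLast?_concat]
        · rw [if_neg hcc, hget c']
          by_cases hct : c' ∈ t
          · rw [hg c' hct hcc]
          · rw [pv_occ_nil hct, pv_occ_nil (by simp [hct, hcc] : c' ∉ t ++ [c])]
    · -- first occurrence of c: no new pair
      have hocc : pvOcc t c = [] := pv_occ_nil hc
      have hpairs : pvPairs (t ++ [c]) = pvPairs t := by
        unfold pvPairs
        rw [pv_dedup_append, if_neg hc, List.flatMap_append, List.flatMap_cons]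
        have h1 : (PySem.List.dedup t).flatMap (fun c' => pvAdj (pvOcc (t ++ [c]) c'))
            = (PySem.List.dedup t).flatMap (fun c' => pvAdj (pvOcc t c')) := by
          refine List.flatMap_congr (fun x hx => ?_)
          have hxt : x ∈ t := (PySem.List.mem_dedup t x).mp hx
          exact congrArg pvAdj (hg x hxt (fun hxc => hc (hxc ▸ hxt)))
        rw [h1, pv_occ_append, if_pos rfl, hocc]
        simp [pvAdj]
      refine ⟨d.insert c (t.length : Int), ?_, ?_⟩
      · unfold pvStepB
        dsimp only
        rw [hget c, hocc, hpairs]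
        rfl
      · intro c'
        rw [PySem.Dict.get?_insert]
        by_cases hcc : c' = c
        · subst hcc
          rw [if_pos rfl, pv_occ_append, if_pos rfl, hocc, List.nil_append]
          rfl
        · rw [if_neg hcc, hget c']
          by_cases hct : c' ∈ t
          · rw [hg c' hct hcc]
          · rw [pv_occ_nil hct, pv_occ_nil (by simp [hct, hcc] : c' ∉ t ++ [c])]

lemma pv_portB_eq (s : String) :
    smallest_gap_alt s
    = (pvBest (pvPairs s.toList)).map
        (fun p => PySem.Str.slice s (some (p.1 + 1)) (some p.2)) := by
  show (match ((PySem.List.enumerate s.toList 0).foldl pvStepB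
        (PySem.Dict.empty, none)).2 with
      | none => none
      | some b => some (PySem.Str.slice s (some (b.2.1 + 1)) (some b.2.2)))
      = (pvBest (pvPairs s.toList)).map
          (fun p => PySem.Str.slice s (some (p.1 + 1)) (some p.2))
  obtain ⟨d, hfold, _⟩ := pv_portB_inv s.toList
  rw [hfold]
  rcases pvBest (pvPairs s.toList) with _ | p
  · rfl
  · rfl

-- ===== VERDICT (by name: the statement is the Claim_ definition above) =====
theorem smallest_gap_spec : Claim_equal_smallest_gap := by
  intro s _ hpre
  have h : s.toList ≠ [] := by
    simpa [String.toList_eq_nil_iff] using hpre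
  unfold Spec_smallest_gap
  rw [pv_portA_eq s h, pv_portB_eq s]
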